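-- pv_equiv track=rewrite | github.com/AdamZhouSE/pythonHomework | Code/CodeRecords/2117/60634/276853.py | solve
-- ===== SOURCE A (Python) =====
-- def solve(n,arr):
--     count = 0
--     k = 1
--     while k <= n:
--         i = k-1
--         while i < n:
--             arr[i] = arr[i]^1
--             i += k
--         count += arr[k-1]
--         k += 1
--     return count
-- ===== SOURCE B (Python) =====
-- def solve(n, arr):
--     # O(n) single pass: after all passes, arr[k-1]'s low bit was flipped once per
--     # divisor of k, so it is flipped iff k is a perfect square (tracked by r).
--     count = 0
--     r = 1
--     for k in range(1, n + 1):
--         v = arr[k - 1]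
--         if r * r == k:
--             v ^= 1
--             r += 1
--         count += v
--     return count
-- ===== Notes on version B (the rewrite author's own statement) =====
-- stated objective: faster
-- what changed: B drops A's sieve of XOR-flip passes over the array entirely: since slot k is flipped once per divisor of k, B makes a single pass adding arr[k-1] with its low bit flipped exactly when k is a perfect square (tracked by an incrementing root), and never mutates arr.
import Mathlib
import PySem

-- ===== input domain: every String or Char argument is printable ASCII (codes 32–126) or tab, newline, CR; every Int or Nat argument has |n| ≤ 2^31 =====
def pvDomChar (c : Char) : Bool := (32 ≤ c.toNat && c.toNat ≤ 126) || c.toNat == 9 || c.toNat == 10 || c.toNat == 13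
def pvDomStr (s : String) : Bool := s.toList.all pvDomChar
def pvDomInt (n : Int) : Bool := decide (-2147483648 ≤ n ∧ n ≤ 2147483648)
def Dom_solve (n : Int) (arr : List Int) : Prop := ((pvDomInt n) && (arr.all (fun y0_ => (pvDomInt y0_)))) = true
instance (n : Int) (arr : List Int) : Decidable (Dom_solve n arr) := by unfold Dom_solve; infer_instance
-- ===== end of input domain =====

-- B replaces A's sieve of XOR-flip passes by a single O(n) pass adding arr[k-1],
-- low bit flipped exactly when k is a perfect square (A mutates arr in place, B does
-- not; the equivalence proved here is about the return value only).

-- ===== PORT A =====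
-- inner 'while i < n: arr[i] ^= 1; i += k' loop of A
def innerFlip (n k : Int) (a : List Int) : List Int :=
  (PySem.List.pyRange (k - 1) n k).foldl
    (fun acc i => acc.set i.toNat (PySem.Int.bxor (PySem.List.pyGetD acc i 0) 1)) a

def solve (n : Int) (arr : List Int) : Int :=
  ((PySem.List.pyRange 1 (n + 1) 1).foldl
    (fun s k =>
      let a := innerFlip n k s.1
      (a, s.2 + PySem.List.pyGetD a (k - 1) 0))
    (arr, (0 : Int))).2

-- ===== PORT B =====
def solve_alt (n : Int) (arr : List Int) : Int :=
  ((PySem.List.pyRange 1 (n + 1) 1).foldl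
    (fun s k =>
      let v := PySem.List.pyGetD arr (k - 1) 0
      if s.2 * s.2 = k then (s.1 + PySem.Int.bxor v 1, s.2 + 1)
      else (s.1 + v, s.2))
    ((0 : Int), (1 : Int))).1

-- ===== PRECONDITION & SPEC =====
-- Pre_ excludes n > len(arr), on which A raises IndexError.
def Pre_solve (n : Int) (arr : List Int) : Prop := n ≤ (arr.length : Int)
instance (n : Int) (arr : List Int) : Decidable (Pre_solve n arr) := by unfold Pre_solve; infer_instance

def pvWitness_solve : Int × List Int := (3, [5, -2, 7])

def Spec_solve (n : Int) (arr : List Int) (out : Int) : Prop := out = solve_alt n arr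
instance (n : Int) (arr : List Int) (out : Int) : Decidable (Spec_solve n arr out) := by unfold Spec_solve; infer_instance

-- ===== CLAIM (what is proved, stated in full; the proofs are below) =====
def Claim_equal_solve : Prop := ∀ (n : Int) (arr : List Int), Dom_solve n arr → Pre_solve n arr → Spec_solve n arr (solve n arr)

-- ===== LEMMAS AND PROOFS =====

-- x ^ 1 ^ 1 = x
theorem bxor_one_one (a : Int) : PySem.Int.bxor (PySem.Int.bxor a 1) 1 = a := by
  unfold PySem.Int.bxor
  split_ifs with h1 h2 h3 h4 h5 h6 <;> simp_all <;> omega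

-- indicator "k is a perfect square"
def sqInd (k : Nat) : Int := if Nat.sqrt k * Nat.sqrt k = k then 1 else 0

-- indicator "index with 1-based position t has been flipped an odd number of times after passes 1..m"
def flipPar (m t : Nat) : Int := if Odd ((Finset.Icc 1 m).filter (· ∣ t)).card then 1 else 0

-- running count of A after passes 1..m
def Csum (arr : List Int) : Nat → Int
  | 0 => 0
  | m + 1 => Csum arr m + PySem.Int.bxor (arr.getD m 0) (flipPar (m + 1) (m + 1))

-- running count of B after iterations 1..m
def Ssum (arr : List Int) : Nat → Int
  | 0 => 0
  | m + 1 => Ssum arr m + PySem.Int.bxor (arr.getD m 0) (sqInd (m + 1))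

theorem getD_set_zero (a : List Int) (i j : Nat) (v : Int) :
    (a.set i v).getD j 0 = if i = j ∧ j < a.length then v else a.getD j 0 := by
  rcases lt_or_ge j a.length with hj | hj
  · rcases eq_or_ne i j with rfl | hij
    · simp [List.getD_eq_getElem?_getD, List.getElem?_set_self, hj]
    · simp [List.getD_eq_getElem?_getD, List.getElem?_set_ne hij, hij]
  · simp [List.getD_eq_getElem?_getD, List.getElem?_eq_none (by simpa using hj),
      List.getElem?_eq_none (l := a.set i v) (by simpa using hj), Nat.not_lt_of_ge hj]

theorem foldl_flip_length (l : List Int) (a : List Int) :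
    (l.foldl (fun acc i => acc.set i.toNat (PySem.Int.bxor (PySem.List.pyGetD acc i 0) 1)) a).length
      = a.length := by
  induction l generalizing a with
  | nil => rfl
  | cons i t ih => simpa [List.foldl_cons] using (ih _).trans (by simp)

theorem foldl_flip_getD (l : List Int) (a : List Int)
    (hnd : l.Nodup) (hm : ∀ i ∈ l, 0 ≤ i ∧ i.toNat < a.length) (j : Nat) :
    (l.foldl (fun acc i => acc.set i.toNat (PySem.Int.bxor (PySem.List.pyGetD acc i 0) 1)) a).getD j 0
      = if (j : Int) ∈ l then PySem.Int.bxor (a.getD j 0) 1 else a.getD j 0 := by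
  induction l generalizing a with
  | nil => simp
  | cons i t ih =>
    obtain ⟨hi0, hilen⟩ := hm i (by simp)
    have hpy : PySem.List.pyGetD a i 0 = a.getD i.toNat 0 := PySem.List.pyGetD_of_nonneg a 0 hi0
    have hnd' : t.Nodup := hnd.of_cons
    have hnotmem : i ∉ t := by simp at hnd; exact hnd.1
    have hm' : ∀ x ∈ t, 0 ≤ x ∧ x.toNat < (a.set i.toNat (PySem.Int.bxor (PySem.List.pyGetD a i 0) 1)).length := by
      intro x hx; simpa using hm x (by simp [hx])
    rw [List.foldl_cons, ih _ hnd' hm']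
    rw [hpy, getD_set_zero]
    by_cases hjt : (j : Int) ∈ t
    · have hji : (j : Int) ≠ i := fun h => hnotmem (h ▸ hjt)
      have : ¬ (i.toNat = j ∧ j < a.length) := by
        rintro ⟨h1, _⟩; exact hji (by omega)
      simp [hjt, this]
    · by_cases hji : (j : Int) = i
      · have h2 : i.toNat = j ∧ j < a.length := by constructor <;> omega
        simp [hjt, hji, h2]
        intro h; exact absurd h hnotmem
      · have h2 : ¬ (i.toNat = j ∧ j < a.length) := by
          rintro ⟨h1, _⟩; exact hji (by omega)
        simp [hjt, hji, h2]

theorem nodup_pyRange_pos (a b s : Int) (hs : 0 < s) : (PySem.List.pyRange a b s).Nodup := by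
  rw [PySem.List.pyRange_of_pos a b hs]
  refine List.Nodup.map ?_ (List.nodup_range)
  intro x y hxy
  have h1 : s * (x : Int) = s * y := by
    have := add_left_cancel hxy
    linarith
  have h2 : (x : Int) = y := mul_left_cancel₀ (by omega : (s : Int) ≠ 0) h1
  exact_mod_cast h2

theorem innerFlip_length (n k : Int) (a : List Int) : (innerFlip n k a).length = a.length :=
  foldl_flip_length _ _

theorem innerFlip_getD (n k : Int) (a : List Int) (hk : 0 < k) (hn : n ≤ (a.length : Int)) (j : Nat) :
    (innerFlip n k a).getD j 0 =
      if ((j : Int) < n ∧ k ∣ ((j : Int) + 1)) then PySem.Int.bxor (a.getD j 0) 1 else a.getD j 0 := by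
  have hmem : ∀ i ∈ PySem.List.pyRange (k - 1) n k, 0 ≤ i ∧ i.toNat < a.length := by
    intro i hi
    rw [PySem.List.mem_pyRange_iff_of_pos hk] at hi
    constructor
    · omega
    · omega
  rw [innerFlip, foldl_flip_getD _ _ (nodup_pyRange_pos _ _ _ hk) hmem j]
  congr 1
  rw [PySem.List.mem_pyRange_iff_of_pos hk]
  simp only [eq_iff_iff]
  constructor
  · rintro ⟨h1, h2, h3⟩
    refine ⟨h2, ?_⟩
    have : (j : Int) + 1 = ((j : Int) - (k - 1)) + k := by ring
    rw [this]; exact dvd_add h3 dvd_rfl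
  · rintro ⟨h1, h2⟩
    have hk1 : k ≤ (j : Int) + 1 := Int.le_of_dvd (by omega) h2
    refine ⟨by omega, h1, ?_⟩
    have : (j : Int) - (k - 1) = ((j : Int) + 1) - k := by ring
    rw [this]; exact dvd_sub h2 dvd_rfl

-- parity step for the flip count
theorem flipPar_succ (m t : Nat) :
    flipPar (m + 1) t = if (m + 1) ∣ t then (if flipPar m t = 1 then 0 else 1) else flipPar m t := by
  unfold flipPar
  have hIcc : Finset.Icc 1 (m + 1) = insert (m + 1) (Finset.Icc 1 m) :=
    (Finset.insert_Icc_right_eq_Icc_add_one (by omega)).symm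
  rw [hIcc, Finset.filter_insert]
  by_cases hd : (m + 1) ∣ t
  · have hnot : (m + 1) ∉ (Finset.Icc 1 m).filter (· ∣ t) := by
      simp [Finset.mem_filter]
    rw [if_pos hd, Finset.card_insert_of_notMem hnot]
    by_cases ho : Odd ((Finset.Icc 1 m).filter (· ∣ t)).card <;>
      simp [hd, ho, Nat.odd_add_one, Nat.not_odd_iff_even] at *
  · simp [hd]

-- A's outer loop invariant
theorem A_loop (n : Int) (arr : List Int) (hlen : n ≤ (arr.length : Int)) (m : Nat) (hm : (m : Int) ≤ n) :
    ∃ Am : List Int,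
      ((PySem.List.pyRange 1 ((m : Int) + 1) 1).foldl
        (fun s k =>
          let a := innerFlip n k s.1
          (a, s.2 + PySem.List.pyGetD a (k - 1) 0))
        (arr, (0 : Int))) = (Am, Csum arr m)
      ∧ Am.length = arr.length
      ∧ (∀ j : Nat, (j : Int) < n → Am.getD j 0 = PySem.Int.bxor (arr.getD j 0) (flipPar m (j + 1)))
      ∧ (∀ j : Nat, n ≤ (j : Int) → Am.getD j 0 = arr.getD j 0) := by
  induction m with
  | zero =>
    refine ⟨arr, ?_, rfl, ?_, fun _ _ => rfl⟩
    · rw [show ((0 : Nat) : Int) + 1 = 1 by norm_num, PySem.List.pyRange_one_eq_nil le_rfl]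
      rfl
    · intro j _
      simp [flipPar]
  | succ m ih =>
    obtain ⟨Am, hfold, hAlen, hin, hout⟩ := ih (by push_cast; push_cast at hm; omega)
    have hk : (0 : Int) < (m : Int) + 1 := by positivity
    have hAn : n ≤ (Am.length : Int) := by rw [hAlen]; exact hlen
    set B := innerFlip n ((m : Int) + 1) Am with hB
    have hBlen : B.length = arr.length := (innerFlip_length _ _ _).trans hAlen
    have hBget := innerFlip_getD n ((m : Int) + 1) Am hk hAn
    have hpoint : ∀ j : Nat, (j : Int) < n →
        B.getD j 0 = PySem.Int.bxor (arr.getD j 0) (flipPar (m + 1) (j + 1)) := by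
      intro j hj
      rw [hBget j]
      have hstep := flipPar_succ m (j + 1)
      by_cases hd : (m + 1) ∣ (j + 1)
      · have hdz : ((m : Int) + 1) ∣ ((j : Int) + 1) := by exact_mod_cast Int.natCast_dvd_natCast.mpr hd
        rw [if_pos ⟨hj, hdz⟩, hin j hj, hstep, if_pos hd]
        by_cases hodd : Odd ((Finset.Icc 1 m).filter (· ∣ (j + 1))).card
        · simp only [flipPar, if_pos hodd]
          norm_num [bxor_one_one, PySem.Int.bxor_zero]
        · simp only [flipPar, if_neg hodd]
          norm_num [PySem.Int.bxor_zero]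
      · have hdz : ¬ ((m : Int) + 1) ∣ ((j : Int) + 1) := by
          intro h; exact hd (by exact_mod_cast h)
        rw [if_neg (by rintro ⟨_, h⟩; exact hdz h), hin j hj, hstep, if_neg hd]
    have hpoint2 : ∀ j : Nat, n ≤ (j : Int) → B.getD j 0 = arr.getD j 0 := by
      intro j hj
      rw [hBget j, if_neg (by rintro ⟨h, _⟩; omega), hout j hj]
    refine ⟨B, ?_, hBlen, hpoint, hpoint2⟩
    have hsplit : PySem.List.pyRange 1 ((((m + 1 : Nat)) : Int) + 1) 1
        = PySem.List.pyRange 1 ((m : Int) + 1) 1 ++ [(m : Int) + 1] := by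
      push_cast
      exact PySem.List.pyRange_one_succ_right (by omega)
    rw [hsplit, List.foldl_append, hfold]
    simp only [List.foldl_cons, List.foldl_nil]
    have hidx : ((m : Int) + 1 - 1) = (m : Int) := by ring
    have hgd : PySem.List.pyGetD B ((m : Int) + 1 - 1) 0 = B.getD m 0 := by
      rw [hidx, PySem.List.pyGetD_of_nonneg _ _ (by positivity)]
      norm_num
    have hmn : (m : Int) < n := by push_cast at hm; omega
    refine Prod.ext rfl ?_
    show Csum arr m + PySem.List.pyGetD (innerFlip n ((m : Int) + 1) Am) ((m : Int) + 1 - 1) 0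
        = Csum arr (m + 1)
    rw [← hB, hgd, hpoint m hmn, Csum]

-- cards of finsets with a fixed-point-free involution are even
theorem even_card_inv (s : Finset Nat) (g : Nat → Nat) (hmem : ∀ a ∈ s, g a ∈ s)
    (hfix : ∀ a ∈ s, g a ≠ a) (hinv : ∀ a ∈ s, g (g a) = a) : Even s.card := by
  have hsum : ∑ _x ∈ s, (1 : ZMod 2) = 0 :=
    Finset.sum_involution (fun a _ => g a) (fun a ha => by decide)
      (fun a ha _ => hfix a ha) (fun a ha => hmem a ha) (fun a ha => hinv a ha)
  have hcast : ((s.card : ZMod 2)) = 0 := by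
    rw [Finset.card_eq_sum_ones]; push_cast; simpa using hsum
  exact ZMod.natCast_eq_zero_iff_even.mp hcast

-- a positive integer has an odd number of divisors iff it is a perfect square
theorem odd_card_divisors_iff (k : Nat) (hk : 0 < k) :
    Odd k.divisors.card ↔ Nat.sqrt k * Nat.sqrt k = k := by
  have hk0 : k ≠ 0 := by omega
  have hdivmem : ∀ a ∈ k.divisors, k / a ∈ k.divisors := by
    intro a ha
    rw [Nat.mem_divisors] at ha ⊢
    exact ⟨Nat.div_dvd_of_dvd ha.1, hk0⟩
  have hdivinv : ∀ a ∈ k.divisors, k / (k / a) = a := by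
    intro a ha
    rw [Nat.mem_divisors] at ha
    exact Nat.div_div_self ha.1 hk0
  have hsq : ∀ a ∈ k.divisors, k / a = a → a * a = k := by
    intro a ha h
    rw [Nat.mem_divisors] at ha
    have := Nat.mul_div_cancel' ha.1
    rw [h] at this
    exact this
  constructor
  · intro hodd
    by_contra hns
    have hev : Even k.divisors.card := by
      refine even_card_inv _ (fun a => k / a) hdivmem ?_ hdivinv
      intro a ha h
      have h2 := hsq a ha h
      have : Nat.sqrt k = a := by rw [← h2, Nat.sqrt_eq]
      exact hns (by rw [this, h2])
    exact (Nat.not_odd_iff_even.mpr hev) hodd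
  · intro h
    set r := Nat.sqrt k with hr
    have hrdvd : r ∈ k.divisors := Nat.mem_divisors.mpr ⟨Dvd.intro r h, hk0⟩
    have hins : insert r (k.divisors.erase r) = k.divisors := Finset.insert_erase hrdvd
    have hcard : k.divisors.card = (k.divisors.erase r).card + 1 := by
      rw [← hins, Finset.card_insert_of_notMem (Finset.notMem_erase _ _),
        Finset.erase_insert (by simp)]
    have hev : Even (k.divisors.erase r).card := by
      refine even_card_inv _ (fun a => k / a) ?_ ?_ ?_
      · intro a ha
        rw [Finset.mem_erase] at ha
        rw [Finset.mem_erase]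
        refine ⟨?_, hdivmem a ha.2⟩
        intro hc
        have hak := (Nat.mem_divisors.mp ha.2).1
        change k / a = r at hc
        have := Nat.mul_div_cancel' hak
        rw [hc] at this
        have hr0 : r ≠ 0 := by
          intro h0; rw [h0] at h; simp at h; omega
        have h2 : a * r = r * r := by rw [this, h]
        exact ha.1 (Nat.eq_of_mul_eq_mul_right (by omega) h2)
      · intro a ha h2
        rw [Finset.mem_erase] at ha
        have h3 := hsq a ha.2 h2
        have : Nat.sqrt k = a := by rw [← h3, Nat.sqrt_eq]
        exact ha.1 (by rw [← this])
      · intro a ha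
        rw [Finset.mem_erase] at ha
        exact hdivinv a ha.2
    rw [hcard]
    exact Even.add_one hev

-- the flips applied to slot k by A's passes 1..k are exactly the divisors of k
theorem flipPar_eq_sqInd (k : Nat) (hk : 0 < k) : flipPar k k = sqInd k := by
  have hfilter : (Finset.Icc 1 k).filter (· ∣ k) = k.divisors := by
    ext d
    simp only [Finset.mem_filter, Finset.mem_Icc, Nat.mem_divisors]
    constructor
    · rintro ⟨⟨_, _⟩, hd⟩; exact ⟨hd, by omega⟩
    · rintro ⟨hd, _⟩
      have hd1 : 1 ≤ d := by
        rcases Nat.eq_zero_or_pos d with rfl | h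
        · rw [Nat.zero_dvd] at hd; omega
        · exact h
      exact ⟨⟨hd1, Nat.le_of_dvd hk hd⟩, hd⟩
  rw [flipPar, hfilter, sqInd]
  by_cases ho : Odd k.divisors.card
  · rw [if_pos ho, if_pos ((odd_card_divisors_iff k hk).mp ho)]
  · rw [if_neg ho, if_neg (fun h => ho ((odd_card_divisors_iff k hk).mpr h))]

theorem Csum_eq_Ssum (arr : List Int) (m : Nat) : Csum arr m = Ssum arr m := by
  induction m with
  | zero => rfl
  | succ m ih => rw [Csum, Ssum, ih, flipPar_eq_sqInd (m + 1) (by omega)]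

-- B's loop invariant: running count and running root
theorem alt_loop (arr : List Int) (m : Nat) :
    ((PySem.List.pyRange 1 ((m : Int) + 1) 1).foldl
      (fun s k =>
        let v := PySem.List.pyGetD arr (k - 1) 0
        if s.2 * s.2 = k then (s.1 + PySem.Int.bxor v 1, s.2 + 1)
        else (s.1 + v, s.2))
      ((0 : Int), (1 : Int))) = (Ssum arr m, (Nat.sqrt m : Int) + 1) := by
  induction m with
  | zero =>
    rw [show ((0 : Nat) : Int) + 1 = 1 by norm_num, PySem.List.pyRange_one_eq_nil le_rfl]
    rfl
  | succ m ih =>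
    have hsplit : PySem.List.pyRange 1 ((((m + 1 : Nat)) : Int) + 1) 1
        = PySem.List.pyRange 1 ((m : Int) + 1) 1 ++ [(m : Int) + 1] := by
      push_cast
      exact PySem.List.pyRange_one_succ_right (by omega)
    rw [hsplit, List.foldl_append, ih]
    simp only [List.foldl_cons, List.foldl_nil]
    have hgd : PySem.List.pyGetD arr ((m : Int) + 1 - 1) 0 = arr.getD m 0 := by
      rw [show ((m : Int) + 1 - 1) = (m : Int) by ring,
        PySem.List.pyGetD_of_nonneg _ _ (by positivity)]
      norm_num
    have hs1 : Nat.sqrt m * Nat.sqrt m ≤ m := Nat.sqrt_le m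
    have hs2 : m < (Nat.sqrt m + 1) * (Nat.sqrt m + 1) := Nat.lt_succ_sqrt m
    by_cases hc : ((Nat.sqrt m : Int) + 1) * ((Nat.sqrt m : Int) + 1) = (m : Int) + 1
    · have hcn : (Nat.sqrt m + 1) * (Nat.sqrt m + 1) = m + 1 := by exact_mod_cast hc
      have hsqs : Nat.sqrt (m + 1) = Nat.sqrt m + 1 := by rw [← hcn, Nat.sqrt_eq]
      have hind : sqInd (m + 1) = 1 := by
        rw [sqInd, if_pos (by rw [hsqs]; exact hcn)]
      rw [if_pos hc, hgd]
      refine Prod.ext ?_ ?_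
      · show Ssum arr m + PySem.Int.bxor (arr.getD m 0) 1 = Ssum arr (m + 1)
        rw [Ssum, hind]
      · show (Nat.sqrt m : Int) + 1 + 1 = ((Nat.sqrt (m + 1) : Nat) : Int) + 1
        rw [hsqs]; push_cast; ring
    · have hcn : (Nat.sqrt m + 1) * (Nat.sqrt m + 1) ≠ m + 1 := by
        intro h; exact hc (by exact_mod_cast h)
      have hsqs : Nat.sqrt (m + 1) = Nat.sqrt m := by
        have hle : Nat.sqrt m ≤ Nat.sqrt (m + 1) := Nat.sqrt_le_sqrt (by omega)
        have h1 : Nat.sqrt (m + 1) * Nat.sqrt (m + 1) ≤ m + 1 := Nat.sqrt_le (m + 1)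
        have h2 : m + 1 < (Nat.sqrt (m + 1) + 1) * (Nat.sqrt (m + 1) + 1) :=
          Nat.lt_succ_sqrt (m + 1)
        by_contra hne
        have hgt : Nat.sqrt m + 1 ≤ Nat.sqrt (m + 1) := by omega
        have h3 : (Nat.sqrt m + 1) * (Nat.sqrt m + 1) ≤ Nat.sqrt (m + 1) * Nat.sqrt (m + 1) :=
          Nat.mul_le_mul hgt hgt
        have : (Nat.sqrt m + 1) * (Nat.sqrt m + 1) = m + 1 := by omega
        exact hcn this
      have hind : sqInd (m + 1) = 0 := by
        rw [sqInd, if_neg]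
        rw [hsqs]
        intro h
        omega
      rw [if_neg hc, hgd]
      refine Prod.ext ?_ ?_
      · show Ssum arr m + arr.getD m 0 = Ssum arr (m + 1)
        rw [Ssum, hind, PySem.Int.bxor_zero]
      · show (Nat.sqrt m : Int) + 1 = ((Nat.sqrt (m + 1) : Nat) : Int) + 1
        rw [hsqs]

-- ===== VERDICT (by name: the statement is the Claim_ definition above) =====
theorem solve_spec : Claim_equal_solve := by
  intro n arr _ hpre
  unfold Spec_solve
  by_cases hn : n ≤ 0
  · have hnil : PySem.List.pyRange 1 (n + 1) 1 = [] :=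
      PySem.List.pyRange_one_eq_nil (by omega)
    rw [solve, solve_alt, hnil]
    rfl
  · obtain ⟨m, rfl⟩ : ∃ m : Nat, n = ((m : Nat) : Int) := ⟨n.toNat, by omega⟩
    obtain ⟨Am, hfold, _, _, _⟩ := A_loop _ arr hpre m le_rfl
    rw [solve, solve_alt, hfold, alt_loop arr m, Csum_eq_Ssum]
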